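-- pv_equiv track=rewrite | github.com/mohammedalanezi/Bent-Functions-in-SAT-Search | helpers.py | checkOrthogonal
-- ===== SOURCE A (Python) =====
-- def checkOrthogonal(square1, square2):
-- 	order = len(square1)
-- 	exists = []
-- 	for i in range(order):
-- 		for j in range(order):
-- 			pair = (square1[i][j], square2[i][j])
-- 			if pair in exists:
-- 				return False
-- 			exists.append(pair)
-- 	return True
-- ===== SOURCE B (Python) =====
-- def checkOrthogonal(square1, square2):
-- 	order = len(square1)
-- 	pairs = [(square1[i][j], square2[i][j]) for i in range(order) for j in range(order)]
-- 	return len(set(pairs)) == len(pairs)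
-- ===== Notes on version B (the rewrite author's own statement) =====
-- stated objective: simpler
-- what changed: Replaces the nested loop with early-exit membership probing into an incrementally grown list by one comprehension building all pairs followed by a single len(set(pairs)) == len(pairs) distinctness check.
-- outside the precondition, e.g. on checkOrthogonal([[1, 2], [1]], [[1, 2], [1]]): A returns False, B raises IndexError
import Mathlib
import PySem

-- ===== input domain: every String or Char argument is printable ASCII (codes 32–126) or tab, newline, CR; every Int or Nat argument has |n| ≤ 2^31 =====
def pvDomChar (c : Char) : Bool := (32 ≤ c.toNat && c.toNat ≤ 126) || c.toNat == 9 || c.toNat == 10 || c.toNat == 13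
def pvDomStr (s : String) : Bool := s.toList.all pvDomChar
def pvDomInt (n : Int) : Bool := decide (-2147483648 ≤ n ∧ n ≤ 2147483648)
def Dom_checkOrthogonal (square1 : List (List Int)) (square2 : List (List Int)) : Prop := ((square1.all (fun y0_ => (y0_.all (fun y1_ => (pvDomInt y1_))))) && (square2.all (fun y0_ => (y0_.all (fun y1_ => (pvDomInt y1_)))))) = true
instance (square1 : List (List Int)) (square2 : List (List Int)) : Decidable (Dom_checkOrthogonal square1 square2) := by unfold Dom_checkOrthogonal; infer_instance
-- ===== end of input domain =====

-- B replaces A's early-exit membership probing into a growing accumulator by building all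
-- pairs in one comprehension and checking len(set(pairs)) == len(pairs) (objective: simpler).

-- ===== PORT A =====
-- the (i, j) iteration order of the two nested 'for' loops
def coIdx (order : Nat) : List (Nat × Nat) :=
  (List.range order).flatMap (fun i => (List.range order).map (fun j => (i, j)))

-- the nested loop body: probe 'exists', early return False, else append the pair
-- (indexing totalised with getD; inside Pre_ every index is in range, matching Python)
def coLoopA (s1 s2 : List (List Int)) : List (Nat × Nat) → List (Int × Int) → Bool
  | [], _ => true
  | (i, j) :: rest, ex =>
    let pair : Int × Int := ((s1.getD i []).getD j 0, (s2.getD i []).getD j 0)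
    if pair ∈ ex then false else coLoopA s1 s2 rest (ex ++ [pair])

def checkOrthogonal (square1 : List (List Int)) (square2 : List (List Int)) : Bool :=
  coLoopA square1 square2 (coIdx square1.length) []

-- ===== PORT B =====
def checkOrthogonal_alt (square1 : List (List Int)) (square2 : List (List Int)) : Bool :=
  let order := square1.length
  let pairs : List (Int × Int) :=
    (List.range order).flatMap (fun i =>
      (List.range order).map (fun j =>
        ((square1.getD i []).getD j 0, (square2.getD i []).getD j 0)))
  (PySem.Set.ofList pairs).length == pairs.length

-- ===== PRECONDITION & SPEC =====
-- Pre_ excludes ragged inputs on which the index accesses square1[i][j]/square2[i][j]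
-- (i, j < len(square1)) go out of range: there A may raise IndexError, or short-circuit
-- to False on an early duplicate before reaching the bad index, while B (which builds
-- the full pair list first) raises IndexError.
def Pre_checkOrthogonal (square1 : List (List Int)) (square2 : List (List Int)) : Prop :=
  square1.length ≤ square2.length ∧
  (∀ r ∈ square1, square1.length ≤ r.length) ∧
  (∀ r ∈ square2.take square1.length, square1.length ≤ r.length)
instance (square1 : List (List Int)) (square2 : List (List Int)) : Decidable (Pre_checkOrthogonal square1 square2) := by unfold Pre_checkOrthogonal; infer_instance

def pvWitness_checkOrthogonal : List (List Int) × List (List Int) :=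
  ([[1, 2], [3, 4]], [[1, 2], [2, 1]])

def Spec_checkOrthogonal (square1 : List (List Int)) (square2 : List (List Int)) (out : Bool) : Prop := out = checkOrthogonal_alt square1 square2
instance (square1 : List (List Int)) (square2 : List (List Int)) (out : Bool) : Decidable (Spec_checkOrthogonal square1 square2 out) := by unfold Spec_checkOrthogonal; infer_instance

-- ===== CLAIM (what is proved, stated in full; the proofs are below) =====
def Claim_equal_checkOrthogonal : Prop := ∀ (square1 : List (List Int)) (square2 : List (List Int)), Dom_checkOrthogonal square1 square2 → Pre_checkOrthogonal square1 square2 → Spec_checkOrthogonal square1 square2 (checkOrthogonal square1 square2)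

-- ===== LEMMAS AND PROOFS =====

-- the pair picked at index (i, j) (proof-side abbreviation for both ports' pair expression)
def pvPair (s1 s2 : List (List Int)) (p : Nat × Nat) : Int × Int :=
  ((s1.getD p.1 []).getD p.2 0, (s2.getD p.1 []).getD p.2 0)

-- A's loop with a duplicate-free accumulator decides Nodup of accumulator ++ new pairs
theorem coLoopA_eq_nodup (s1 s2 : List (List Int)) :
    ∀ (l : List (Nat × Nat)) (ex : List (Int × Int)), ex.Nodup →
      coLoopA s1 s2 l ex = decide (ex ++ l.map (pvPair s1 s2)).Nodup := by
  intro l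
  induction l with
  | nil => intro ex h; simp [coLoopA, h]
  | cons hd tl ih =>
    intro ex h
    obtain ⟨i, j⟩ := hd
    show (if pvPair s1 s2 (i, j) ∈ ex then false
          else coLoopA s1 s2 tl (ex ++ [pvPair s1 s2 (i, j)])) =
        decide (ex ++ (pvPair s1 s2 (i, j) :: tl.map (pvPair s1 s2))).Nodup
    by_cases hmem : pvPair s1 s2 (i, j) ∈ ex
    · rw [if_pos hmem, eq_comm, decide_eq_false_iff_not]
      intro hnd
      rcases List.nodup_append.mp hnd with ⟨-, -, hdisj⟩
      exact hdisj _ hmem _ (by simp) rfl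
    · rw [if_neg hmem]
      have hnd : (ex ++ [pvPair s1 s2 (i, j)]).Nodup :=
        h.append (List.nodup_singleton _)
          (fun a ha hb => hmem ((List.mem_singleton.mp hb) ▸ ha))
      rw [ih _ hnd, List.append_assoc, List.singleton_append]

-- B's pair list is A's index list mapped through the pair function
theorem pairs_eq_map (s1 s2 : List (List Int)) :
    (List.range s1.length).flatMap (fun i =>
      (List.range s1.length).map (fun j =>
        ((s1.getD i []).getD j 0, (s2.getD i []).getD j 0))) =
    (coIdx s1.length).map (pvPair s1 s2) := by
  simp [coIdx, List.map_flatMap, List.map_map, Function.comp_def, pvPair]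

-- adding one element grows a set by at most one
theorem length_add_le {α : Type} [BEq α] (s : List α) (x : α) :
    (PySem.Set.add s x).length ≤ s.length + 1 := by
  unfold PySem.Set.add
  split <;> simp

-- length bound for folding Set.add
theorem length_foldl_add_le {α : Type} [BEq α] (l : List α) :
    ∀ s : List α, (l.foldl PySem.Set.add s).length ≤ s.length + l.length := by
  induction l with
  | nil => intro s; simp
  | cons x tl ih =>
    intro s
    simp only [List.foldl_cons, List.length_cons]
    refine le_trans (ih _) ?_
    have := length_add_le s x
    omega

-- folding Set.add onto a duplicate-free s keeps the full length iff s ++ l is duplicate-free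
theorem length_foldl_add_eq_iff (l : List (Int × Int)) :
    ∀ s : List (Int × Int), s.Nodup →
      ((l.foldl PySem.Set.add s).length = s.length + l.length ↔ (s ++ l).Nodup) := by
  induction l with
  | nil => intro s hs; simpa using hs
  | cons x tl ih =>
    intro s hs
    simp only [List.foldl_cons]
    by_cases hmem : x ∈ s
    · have haddx : PySem.Set.add s x = s := by
        simp [PySem.Set.add, PySem.Set.contains, hmem]
      rw [haddx]
      constructor
      · intro hlen
        exfalso
        have hb := length_foldl_add_le tl s
        simp only [List.length_cons] at hlen
        omega
      · intro hnd
        exfalso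
        rcases List.nodup_append.mp hnd with ⟨-, -, hdisj⟩
        exact hdisj _ hmem _ (by simp) rfl
    · have haddx : PySem.Set.add s x = s ++ [x] := by
        simp [PySem.Set.add, PySem.Set.contains, hmem]
      rw [haddx]
      have hnd : (s ++ [x]).Nodup :=
        hs.append (List.nodup_singleton x)
          (fun a ha hb => hmem ((List.mem_singleton.mp hb) ▸ ha))
      have hlen : s.length + (x :: tl).length = (s ++ [x]).length + tl.length := by
        simp only [List.length_cons, List.length_append, List.length_nil]
        omega
      rw [hlen, ih _ hnd, List.append_assoc, List.singleton_append]

-- ===== VERDICT (by name: the statement is the Claim_ definition above) =====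
theorem checkOrthogonal_spec : Claim_equal_checkOrthogonal := by
  intro s1 s2 _ _
  unfold Spec_checkOrthogonal checkOrthogonal checkOrthogonal_alt
  simp only [pairs_eq_map s1 s2]
  rw [coLoopA_eq_nodup s1 s2 _ [] List.nodup_nil, List.nil_append]
  have hiff := length_foldl_add_eq_iff ((coIdx s1.length).map (pvPair s1 s2)) [] List.nodup_nil
  rw [List.nil_append] at hiff
  simp only [List.length_nil, Nat.zero_add] at hiff
  rw [PySem.Set.ofList_eq_foldl]
  by_cases hnd : ((coIdx s1.length).map (pvPair s1 s2)).Nodup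
  · rw [decide_eq_true hnd, hiff.mpr hnd, eq_comm, beq_iff_eq]
  · have hne := fun h => hnd (hiff.mp h)
    rw [decide_eq_false hnd, eq_comm, Bool.eq_false_iff]
    intro hb
    exact hne (by simpa using hb)
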